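-- pv_equiv track=rewrite | github.com/newinnovations/aoc | 2019/22/aoc-2019-22b.py | polypow
-- ===== SOURCE A (Python) =====
-- def polypow(a, b, k, M):
--     if k == 0:
--         return 1, 0
--     if k % 2 == 0:
--         return polypow(a * a % M, (a * b + b) % M, k // 2, M)
--     else:
--         c, d = polypow(a, b, k - 1, M)
--         return a * c % M, (a * d + b) % M
-- ===== SOURCE B (Python) =====
-- def polypow(a, b, k, M):
--     ra, rb = 1, 0
--     ba, bb = a, b
--     while k > 0:
--         if k % 2 == 1:
--             ra, rb = ba * ra % M, (ba * rb + bb) % M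
--         ba, bb = ba * ba % M, (ba * bb + bb) % M
--         k //= 2
--     return ra, rb
-- ===== Notes on version B (the rewrite author's own statement) =====
-- stated objective: alternative
-- what changed: Replaced A's recursive decrement-or-halve descent by an iterative binary-exponentiation loop that keeps an accumulator and a repeatedly squared base (composition of powers of one linear map commutes, so the value is identical); also constant stack instead of recursion.
import Mathlib
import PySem

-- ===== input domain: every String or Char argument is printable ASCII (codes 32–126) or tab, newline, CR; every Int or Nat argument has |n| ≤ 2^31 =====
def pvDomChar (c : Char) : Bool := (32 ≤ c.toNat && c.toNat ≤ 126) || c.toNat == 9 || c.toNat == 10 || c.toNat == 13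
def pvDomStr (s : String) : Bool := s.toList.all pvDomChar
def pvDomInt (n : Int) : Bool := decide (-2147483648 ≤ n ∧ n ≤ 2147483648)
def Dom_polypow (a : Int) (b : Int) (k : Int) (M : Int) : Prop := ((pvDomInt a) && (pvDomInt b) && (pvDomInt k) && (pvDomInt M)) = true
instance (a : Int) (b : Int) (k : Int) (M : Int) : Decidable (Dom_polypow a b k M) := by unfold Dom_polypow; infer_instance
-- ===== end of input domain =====

-- B replaces A's recursive decrement-or-halve descent by an iterative binary-exponentiation
-- loop (accumulator composed with a repeatedly squared base); return values agree on all k ≥ 0.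

-- ===== PORT A =====
-- Fuel makes A's recursion total in Lean; k.toNat + 1 units suffice because every
-- recursive call strictly decreases k by at least 1 while k ≥ 1 (proved in fuelA_eq_piter).
def polypowFuel : Nat → Int → Int → Int → Int → Int × Int
  | 0, _, _, _, _ => (1, 0)
  | n + 1, a, b, k, M =>
    if k = 0 then (1, 0)
    else if PySem.Int.mod k 2 = 0 then
      polypowFuel n (PySem.Int.mod (a * a) M) (PySem.Int.mod (a * b + b) M)
        (PySem.Int.floordiv k 2) M
    else
      match polypowFuel n a b (k - 1) M with
      | (c, d) => (PySem.Int.mod (a * c) M, PySem.Int.mod (a * d + b) M)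

def polypow (a : Int) (b : Int) (k : Int) (M : Int) : Int × Int :=
  polypowFuel (k.toNat + 1) a b k M

-- ===== PORT B =====
-- Fuel makes B's while-loop total in Lean; k.toNat units suffice because k is at
-- least halved each iteration (proved in loopF_eq_piter).
def polypowLoopF : Nat → Int → Int → Int → Int → Int → Int → Int × Int
  | 0, ra, rb, _, _, _, _ => (ra, rb)
  | n + 1, ra, rb, ba, bb, k, M =>
    if 0 < k then
      let rab :=
        if PySem.Int.mod k 2 = 1 then
          (PySem.Int.mod (ba * ra) M, PySem.Int.mod (ba * rb + bb) M)
        else (ra, rb)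
      polypowLoopF n rab.1 rab.2 (PySem.Int.mod (ba * ba) M)
        (PySem.Int.mod (ba * bb + bb) M) (PySem.Int.floordiv k 2) M
    else (ra, rb)

def polypow_alt (a : Int) (b : Int) (k : Int) (M : Int) : Int × Int :=
  polypowLoopF k.toNat 1 0 a b k M

-- ===== PRECONDITION & SPEC =====
-- Pre_ excludes exactly the inputs where the Python A raises: k < 0 (unbounded
-- recursion, RecursionError) and M = 0 with k > 0 (ZeroDivisionError in `% M`).
def Pre_polypow (a : Int) (b : Int) (k : Int) (M : Int) : Prop := 0 ≤ k ∧ (M ≠ 0 ∨ k = 0)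
instance (a : Int) (b : Int) (k : Int) (M : Int) : Decidable (Pre_polypow a b k M) := by
  unfold Pre_polypow; infer_instance
def pvWitness_polypow : Int × Int × Int × Int := (3, 5, 4, 7)


def Spec_polypow (a : Int) (b : Int) (k : Int) (M : Int) (out : Int × Int) : Prop :=
  out = polypow_alt a b k M
instance (a : Int) (b : Int) (k : Int) (M : Int) (out : Int × Int) :
    Decidable (Spec_polypow a b k M out) := by unfold Spec_polypow; infer_instance

-- ===== CLAIM (what is proved, stated in full; the proofs are below) =====
def Claim_equal_polypow : Prop := ∀ (a : Int) (b : Int) (k : Int) (M : Int),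
  Dom_polypow a b k M → Pre_polypow a b k M → Spec_polypow a b k M (polypow a b k M)


-- ===== LEMMAS AND PROOFS =====

-- one application of the linear map x ↦ a·x + b followed by reduction mod M
def pstep (a b M : Int) (s : Int × Int) : Int × Int :=
  (PySem.Int.mod (a * s.1) M, PySem.Int.mod (a * s.2 + b) M)

-- n applications of pstep: the common semantic yardstick for both ports
def piter (a b M : Int) : Nat → Int × Int → Int × Int
  | 0, s => s
  | n + 1, s => pstep a b M (piter a b M n s)

theorem dvd_pymod_sub (M x : Int) : M ∣ PySem.Int.mod x M - x := by
  refine ⟨-(PySem.Int.floordiv x M), ?_⟩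
  have h := PySem.Int.floordiv_mul_add_mod x M
  linarith

theorem pymod_congr (M x y : Int) (h : M ∣ x - y) :
    PySem.Int.mod x M = PySem.Int.mod y M := by
  have h1 := dvd_pymod_sub M x
  have h2 := dvd_pymod_sub M y
  have h3 : M ∣ PySem.Int.mod x M - PySem.Int.mod y M := by
    have := (h1.add h).sub h2
    simpa [sub_add_sub_cancel] using by
      have : PySem.Int.mod x M - x + (x - y) - (PySem.Int.mod y M - y)
          = PySem.Int.mod x M - PySem.Int.mod y M := by ring
      rw [← this]; exact (h1.add h).sub h2
  -- both remainders lie in the same half-open window of width |M|, so they are equal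
  rcases lt_trichotomy M 0 with hM | hM | hM
  · have b1 := PySem.Int.mod_neg_bounds x hM
    have b2 := PySem.Int.mod_neg_bounds y hM
    obtain ⟨c, hc⟩ := h3
    have hc0 : c = 0 := by nlinarith [b1.1, b1.2, b2.1, b2.2]
    rw [hc0, mul_zero] at hc
    omega
  · subst hM
    obtain ⟨c, hc⟩ := h
    have hx : PySem.Int.mod x 0 = x := by
      have := PySem.Int.floordiv_mul_add_mod x 0; linarith
    have hy : PySem.Int.mod y 0 = y := by
      have := PySem.Int.floordiv_mul_add_mod y 0; linarith
    omega
  · have b1 : 0 ≤ PySem.Int.mod x M := PySem.Int.mod_nonneg x hM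
    have b1' : PySem.Int.mod x M < M := PySem.Int.mod_lt x hM
    have b2 : 0 ≤ PySem.Int.mod y M := PySem.Int.mod_nonneg y hM
    have b2' : PySem.Int.mod y M < M := PySem.Int.mod_lt y hM
    obtain ⟨c, hc⟩ := h3
    have hc0 : c = 0 := by nlinarith
    rw [hc0, mul_zero] at hc
    omega

-- squaring the linear map commutes with one double step (mod-reduction is harmless)
theorem sq_step (a b M : Int) (s : Int × Int) :
    pstep (PySem.Int.mod (a * a) M) (PySem.Int.mod (a * b + b) M) M s
      = pstep a b M (pstep a b M s) := by
  unfold pstep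
  have hsq := dvd_pymod_sub M (a * a)
  have hlin := dvd_pymod_sub M (a * b + b)
  refine Prod.ext ?_ ?_
  · show PySem.Int.mod (PySem.Int.mod (a * a) M * s.1) M
        = PySem.Int.mod (a * PySem.Int.mod (a * s.1) M) M
    have e1 : PySem.Int.mod (PySem.Int.mod (a * a) M * s.1) M
        = PySem.Int.mod (a * a * s.1) M := by
      apply pymod_congr
      have : PySem.Int.mod (a * a) M * s.1 - a * a * s.1
          = (PySem.Int.mod (a * a) M - a * a) * s.1 := by ring
      rw [this]; exact hsq.mul_right s.1
    have e2 : PySem.Int.mod (a * PySem.Int.mod (a * s.1) M) M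
        = PySem.Int.mod (a * (a * s.1)) M := by
      apply pymod_congr
      have : a * PySem.Int.mod (a * s.1) M - a * (a * s.1)
          = a * (PySem.Int.mod (a * s.1) M - a * s.1) := by ring
      rw [this]; exact (dvd_pymod_sub M (a * s.1)).mul_left a
    rw [e1, e2]; ring_nf
  · show PySem.Int.mod (PySem.Int.mod (a * a) M * s.2 + PySem.Int.mod (a * b + b) M) M
        = PySem.Int.mod (a * PySem.Int.mod (a * s.2 + b) M + b) M
    have e1 : PySem.Int.mod (PySem.Int.mod (a * a) M * s.2 + PySem.Int.mod (a * b + b) M) M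
        = PySem.Int.mod (a * a * s.2 + (a * b + b)) M := by
      apply pymod_congr
      have : PySem.Int.mod (a * a) M * s.2 + PySem.Int.mod (a * b + b) M
          - (a * a * s.2 + (a * b + b))
          = (PySem.Int.mod (a * a) M - a * a) * s.2
            + (PySem.Int.mod (a * b + b) M - (a * b + b)) := by ring
      rw [this]; exact (hsq.mul_right s.2).add hlin
    have e2 : PySem.Int.mod (a * PySem.Int.mod (a * s.2 + b) M + b) M
        = PySem.Int.mod (a * (a * s.2 + b) + b) M := by
      apply pymod_congr
      have : a * PySem.Int.mod (a * s.2 + b) M + b - (a * (a * s.2 + b) + b)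
          = a * (PySem.Int.mod (a * s.2 + b) M - (a * s.2 + b)) := by ring
      rw [this]; exact (dvd_pymod_sub M (a * s.2 + b)).mul_left a
    rw [e1, e2]; ring_nf

theorem piter_add (a b M : Int) (m n : Nat) (s : Int × Int) :
    piter a b M (m + n) s = piter a b M m (piter a b M n s) := by
  induction m with
  | zero => simp [piter]
  | succ m ih => rw [Nat.succ_add]; simp [piter, ih]

theorem piter_sq (a b M : Int) (n : Nat) (s : Int × Int) :
    piter (PySem.Int.mod (a * a) M) (PySem.Int.mod (a * b + b) M) M n s
      = piter a b M (2 * n) s := by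
  induction n with
  | zero => rfl
  | succ n ih =>
    have h2 : 2 * (n + 1) = (2 * n) + 1 + 1 := by omega
    rw [h2]
    show pstep (PySem.Int.mod (a * a) M) (PySem.Int.mod (a * b + b) M) M
        (piter (PySem.Int.mod (a * a) M) (PySem.Int.mod (a * b + b) M) M n s)
      = piter a b M (2 * n + 1 + 1) s
    rw [ih, sq_step]
    rfl

theorem fuelA_eq_piter (n : Nat) : ∀ (a b k M : Int), 0 ≤ k → k.toNat < n →
    polypowFuel n a b k M = piter a b M k.toNat (1, 0) := by
  induction n with
  | zero => intro a b k M _ h; omega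
  | succ n ih =>
    intro a b k M hk hn
    by_cases h0 : k = 0
    · subst h0; simp [polypowFuel, piter]
    · have hk1 : 1 ≤ k := by omega
      have hmod : PySem.Int.mod k 2 = k % 2 := PySem.Int.mod_eq_emod_of_pos (by norm_num)
      have hdiv : PySem.Int.floordiv k 2 = k / 2 := PySem.Int.floordiv_eq_ediv_of_pos (by norm_num)
      by_cases he : PySem.Int.mod k 2 = 0
      · have he' : k % 2 = 0 := by omega
        have hrec := ih (PySem.Int.mod (a * a) M) (PySem.Int.mod (a * b + b) M) (k / 2) M
          (by omega) (by omega)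
        have : polypowFuel (n + 1) a b k M
            = polypowFuel n (PySem.Int.mod (a * a) M) (PySem.Int.mod (a * b + b) M)
              (PySem.Int.floordiv k 2) M := by
          simp only [polypowFuel]
          rw [if_neg h0, if_pos he]
        rw [this, hdiv, hrec, piter_sq]
        congr 1
        omega
      · have ho : k % 2 = 1 := by omega
        have hrec := ih a b (k - 1) M (by omega) (by omega)
        have hstep : polypowFuel (n + 1) a b k M
            = pstep a b M (polypowFuel n a b (k - 1) M) := by
          simp only [polypowFuel, if_neg h0, if_neg he]
          rcases polypowFuel n a b (k - 1) M with ⟨c, d⟩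
          rfl
        rw [hstep, hrec]
        have : k.toNat = (k - 1).toNat + 1 := by omega
        rw [this]
        rfl

theorem loopF_eq_piter (n : Nat) : ∀ (ra rb ba bb k M : Int), k.toNat ≤ n →
    polypowLoopF n ra rb ba bb k M = piter ba bb M k.toNat (ra, rb) := by
  induction n with
  | zero =>
    intro ra rb ba bb k M h
    have : k.toNat = 0 := by omega
    rw [this]; rfl
  | succ n ih =>
    intro ra rb ba bb k M hn
    by_cases hk : 0 < k
    · have hmod : PySem.Int.mod k 2 = k % 2 := PySem.Int.mod_eq_emod_of_pos (by norm_num)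
      have hdiv : PySem.Int.floordiv k 2 = k / 2 := PySem.Int.floordiv_eq_ediv_of_pos (by norm_num)
      have hrec : (k / 2).toNat ≤ n := by omega
      by_cases ho : PySem.Int.mod k 2 = 1
      · have ho' : k % 2 = 1 := by omega
        have : polypowLoopF (n + 1) ra rb ba bb k M
            = polypowLoopF n (PySem.Int.mod (ba * ra) M) (PySem.Int.mod (ba * rb + bb) M)
              (PySem.Int.mod (ba * ba) M) (PySem.Int.mod (ba * bb + bb) M)
              (PySem.Int.floordiv k 2) M := by
          simp only [polypowLoopF]
          rw [if_pos hk, if_pos ho]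
        rw [this, hdiv, ih _ _ _ _ _ _ hrec, piter_sq]
        have hsplit : k.toNat = 2 * (k / 2).toNat + 1 := by omega
        rw [hsplit, piter_add]
        rfl
      · have he' : k % 2 = 0 := by omega
        have : polypowLoopF (n + 1) ra rb ba bb k M
            = polypowLoopF n ra rb (PySem.Int.mod (ba * ba) M)
              (PySem.Int.mod (ba * bb + bb) M) (PySem.Int.floordiv k 2) M := by
          simp only [polypowLoopF]
          rw [if_pos hk, if_neg ho]
        rw [this, hdiv, ih _ _ _ _ _ _ hrec, piter_sq]
        congr 1
        omega
    · have : k.toNat = 0 := by omega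
      rw [this]
      simp only [polypowLoopF]
      rw [if_neg hk]
      rfl

-- ===== VERDICT (by name: the statement is the Claim_ definition above) =====
theorem polypow_spec : Claim_equal_polypow := by
  intro a b k M _ hpre
  unfold Spec_polypow polypow polypow_alt
  rw [fuelA_eq_piter (k.toNat + 1) a b k M hpre.1 (by omega),
      loopF_eq_piter k.toNat 1 0 a b k M (le_refl _)]
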